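-- pv_equiv track=rewrite | github.com/tobiasspt/advent_of_code | 2015/Day11/day11.py | has_two_doubles
-- ===== SOURCE A (Python) =====
-- def has_two_doubles(pwd: str) -> bool:
--     counter = 0
--     for o in range(ord("a"), ord("z")+1):
--         if chr(o)*2 in pwd:
--             counter += 1
--             if counter == 2:
--                 return True
--     return False
-- ===== SOURCE B (Python) =====
-- def has_two_doubles(pwd: str) -> bool:
--     # One forward pass over adjacent pairs; collect the distinct doubled lowercase letters.
--     doubles = {a for a, b in zip(pwd, pwd[1:]) if a == b and 'a' <= a <= 'z'}
--     return len(doubles) >= 2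
-- ===== Notes on version B (the rewrite author's own statement) =====
-- stated objective: simpler
-- what changed: Replaces the 26-letter loop of substring scans ('aa' in pwd, 'bb' in pwd, ...) by a single pass over adjacent character pairs that collects the distinct doubled lowercase letters into a set comprehension and compares its size with 2.
import Mathlib
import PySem

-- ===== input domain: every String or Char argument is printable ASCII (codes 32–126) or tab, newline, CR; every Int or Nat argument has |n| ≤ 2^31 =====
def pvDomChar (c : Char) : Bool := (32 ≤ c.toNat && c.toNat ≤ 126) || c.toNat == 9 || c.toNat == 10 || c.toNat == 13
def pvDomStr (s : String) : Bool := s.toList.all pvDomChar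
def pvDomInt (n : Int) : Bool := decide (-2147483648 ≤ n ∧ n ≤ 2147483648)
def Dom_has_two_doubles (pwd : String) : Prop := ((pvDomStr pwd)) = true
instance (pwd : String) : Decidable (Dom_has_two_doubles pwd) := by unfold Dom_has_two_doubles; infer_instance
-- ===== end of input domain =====

-- B replaces A's 26 substring scans ('aa' in pwd, 'bb' in pwd, …) by one pass over
-- adjacent pairs collecting the distinct doubled lowercase letters into a set.

-- ===== PORT A =====
-- the for-loop with its early 'return True'; o runs over range(ord("a"), ord("z")+1) = range(97, 123);
-- chr(o) is ported as Char.ofNat o.toNat (exact here: every o the loop feeds it is 97..122);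
-- 'chr(o)*2 in pwd' is PySem.Chars.isIn of the two-character list.
def has_two_doubles_loop (cs : List Char) : List Int → Int → Bool
  | [], _ => false
  | o :: os, counter =>
      if PySem.Chars.isIn [Char.ofNat o.toNat, Char.ofNat o.toNat] cs then
        if counter + 1 == 2 then true
        else has_two_doubles_loop cs os (counter + 1)
      else has_two_doubles_loop cs os counter

def has_two_doubles (pwd : String) : Bool :=
  has_two_doubles_loop pwd.toList (PySem.List.pyRange 97 123 1) 0

-- ===== PORT B =====
-- the set comprehension {a for a, b in zip(pwd, pwd[1:]) if a == b and 'a' <= a <= 'z'},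
-- then len(doubles) >= 2
def has_two_doubles_alt (pwd : String) : Bool :=
  let cs := pwd.toList
  let doubles : PySem.Set Char :=
    PySem.Set.ofList
      (((cs.zip (PySem.List.slice cs (some 1) none)).filter
          (fun ab => ab.1 == ab.2 && decide ('a' ≤ ab.1) && decide (ab.1 ≤ 'z'))).map Prod.fst)
  decide (2 ≤ PySem.Set.len doubles)

-- ===== PRECONDITION & SPEC =====
def Spec_has_two_doubles (pwd : String) (out : Bool) : Prop := out = has_two_doubles_alt pwd
instance (pwd : String) (out : Bool) : Decidable (Spec_has_two_doubles pwd out) := by unfold Spec_has_two_doubles; infer_instance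

-- ===== CLAIM (what is proved, stated in full; the proofs are below) =====
def Claim_equal_has_two_doubles : Prop := ∀ (pwd : String), Dom_has_two_doubles pwd → Spec_has_two_doubles pwd (has_two_doubles pwd)

-- ===== LEMMAS AND PROOFS =====

-- the 26 letters A scans, as characters
def dblList : List Char := ['a','b','c','d','e','f','g','h','i','j','k','l','m','n','o','p','q','r','s','t','u','v','w','x','y','z']

theorem pyRange_eq_dblList : PySem.List.pyRange 97 123 1 = dblList.map (fun c => (c.toNat : Int)) := by decide

-- A's loop returns whether the count of scanned letters whose double occurs reaches 2
theorem loop_eq_countP (cs : List Char) (os : List Int) :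
    ∀ counter : Int, 0 ≤ counter → counter ≤ 1 →
      has_two_doubles_loop cs os counter =
        decide (2 ≤ counter + (os.countP (fun o => PySem.Chars.isIn [Char.ofNat o.toNat, Char.ofNat o.toNat] cs) : Int)) := by
  induction os with
  | nil => intro counter h0 h1; simp [has_two_doubles_loop]; omega
  | cons o os ih =>
      intro counter h0 h1
      rw [has_two_doubles_loop]
      by_cases hp : PySem.Chars.isIn [Char.ofNat o.toNat, Char.ofNat o.toNat] cs = true
      · rw [if_pos hp]
        by_cases h2 : counter + 1 = 2
        · have : (counter + 1 == 2) = true := by simp [h2]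
          rw [this, if_pos rfl]
          have hcnt : (0 : Int) ≤ (os.countP (fun o => PySem.Chars.isIn [Char.ofNat o.toNat, Char.ofNat o.toNat] cs) : Int) := by positivity
          simp [hp]
          omega
        · have : (counter + 1 == 2) = false := by simp [h2]
          rw [this]
          simp only [Bool.false_eq_true, if_false]
          rw [ih (counter + 1) (by omega) (by omega)]
          simp [hp]
          constructor <;> (intro; omega)
      · rw [if_neg hp, ih counter h0 h1]
        simp [hp]

-- a two-character substring occurs exactly at an adjacent equal-position pair
theorem infix_pair_iff_mem_zip (a b : Char) : ∀ (cs : List Char),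
    ([a, b] <:+: cs ↔ (a, b) ∈ cs.zip (cs.drop 1))
  | [] => by simp
  | [x] => by
      constructor
      · intro h; exact absurd h.length_le (by simp)
      · simp
  | x :: y :: t => by
      rw [List.infix_cons_iff]
      constructor
      · rintro (h | h)
        · rw [List.cons_prefix_cons] at h
          obtain ⟨rfl, h⟩ := h
          rw [List.cons_prefix_cons] at h
          simp [h.1]
        · have := (infix_pair_iff_mem_zip a b (y :: t)).1 h
          simp at this ⊢
          tauto
      · intro h
        simp at h
        rcases h with ⟨rfl, rfl⟩ | h
        · left; simp
        · right
          exact (infix_pair_iff_mem_zip a b (y :: t)).2 (by simpa using h)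

theorem mem_dblList_iff (c : Char) : c ∈ dblList ↔ ('a' ≤ c ∧ c ≤ 'z') := by
  constructor
  · intro h; fin_cases h <;> exact ⟨by decide, by decide⟩
  · rintro ⟨h1, h2⟩
    have hl : 97 ≤ c.toNat := h1
    have hu : c.toNat ≤ 122 := h2
    have hc : c = Char.ofNat c.toNat := (Char.ofNat_toNat c).symm
    set n := c.toNat with hn
    interval_cases n <;> (rw [hc]; decide)

-- membership in B's set of doubled lowercase letters
theorem mem_doubles_iff (cs : List Char) (c : Char) :
    c ∈ PySem.Set.ofList
        (((cs.zip (PySem.List.slice cs (some 1) none)).filter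
            (fun ab => ab.1 == ab.2 && decide ('a' ≤ ab.1) && decide (ab.1 ≤ 'z'))).map Prod.fst) ↔
      ((c, c) ∈ cs.zip (cs.drop 1) ∧ 'a' ≤ c ∧ c ≤ 'z') := by
  rw [PySem.Set.mem_ofList]
  simp only [List.mem_map, List.mem_filter]
  constructor
  · rintro ⟨⟨x, y⟩, ⟨hm, hcond⟩, rfl⟩
    simp at hcond
    obtain ⟨⟨rfl, h1⟩, h2⟩ := hcond
    refine ⟨?_, h1, h2⟩
    simpa [pysem] using hm
  · rintro ⟨hm, h1, h2⟩
    exact ⟨(c, c), ⟨by simpa [pysem] using hm, by simp [h1, h2]⟩, rfl⟩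

-- A's filtered letter list and B's set have the same elements, both without duplicates
theorem filter_length_eq (cs : List Char) :
    (dblList.filter (fun c => PySem.Chars.isIn [c, c] cs)).length =
      (PySem.Set.ofList
        (((cs.zip (PySem.List.slice cs (some 1) none)).filter
            (fun ab => ab.1 == ab.2 && decide ('a' ≤ ab.1) && decide (ab.1 ≤ 'z'))).map Prod.fst)).length := by
  apply List.Perm.length_eq
  rw [List.perm_ext_iff_of_nodup (List.Nodup.filter _ (by decide)) (PySem.Set.nodup_ofList _)]
  intro c
  rw [List.mem_filter, mem_doubles_iff, mem_dblList_iff, PySem.Chars.isIn_iff_infix,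
      infix_pair_iff_mem_zip]
  tauto

-- ===== VERDICT (by name: the statement is the Claim_ definition above) =====
theorem has_two_doubles_spec : Claim_equal_has_two_doubles := by
  intro pwd _
  unfold Spec_has_two_doubles has_two_doubles has_two_doubles_alt
  rw [loop_eq_countP _ _ 0 (by omega) (by omega), pyRange_eq_dblList]
  rw [List.countP_map]
  have hpt : (dblList.countP
      ((fun o => PySem.Chars.isIn [Char.ofNat o.toNat, Char.ofNat o.toNat] pwd.toList) ∘ (fun c => (c.toNat : Int))))
      = dblList.countP (fun c => PySem.Chars.isIn [c, c] pwd.toList) := by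
    apply List.countP_congr
    intro c hc
    fin_cases hc <;> rfl
  rw [hpt, List.countP_eq_length_filter, filter_length_eq pwd.toList]
  norm_num
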